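-- pv_equiv track=rewrite | github.com/Melodiz/CodeRun | Algorithms/Easy/212_max_num_split/solution.py | find_max_distinct_split
-- ===== SOURCE A (Python) =====
-- def find_max_distinct_split(s):
--     # Brute force approach to find all possible splits
--     def backtrack(start, path, used):
--         if start == len(s):
--             return path
--
--         best_path = []
--
--         for end in range(start + 1, len(s) + 1):
--             num = s[start:end]
--
--             # Skip numbers with leading zeros
--             if num[0] == '0' and len(num) > 1:
--                 continue
--
--             # Skip if this number is already used
--             if num in used:
--                 continue
--
--             # Try this number
--             new_path = path + [num]
--             new_used = used | {num}
--
--             # Recursively find the best path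
--             result = backtrack(end, new_path, new_used)
--
--             # Update best path if this one has more parts
--             if len(result) > len(best_path):
--                 best_path = result
--
--         return best_path
--
--     return backtrack(0, [], set())
-- ===== SOURCE B (Python) =====
-- def find_max_distinct_split(s):
--     # Explicit-stack DFS instead of recursion: pop (start, path, used) states;
--     # push child cuts with end descending so shorter prefixes are explored first,
--     # and update best only on strictly greater length (first maximum wins).
--     n = len(s)
--     best = []
--     stack = [(0, [], frozenset())]
--     while stack:
--         start, path, used = stack.pop()
--         if start == n:
--             if len(path) > len(best):
--                 best = path
--         else:
--             for end in range(n, start, -1):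
--                 num = s[start:end]
--                 if num[0] == '0' and len(num) > 1:
--                     continue
--                 if num in used:
--                     continue
--                 stack.append((end, path + [num], used | {num}))
--     return best
-- ===== Notes on version B (the rewrite author's own statement) =====
-- stated objective: alternative
-- what changed: Replaces A's recursive backtracking (per-node best-path comparison with a path accumulator threaded through nested calls) by an explicit-stack iterative DFS that keeps one global running best and compares only at complete splits, pushing child cuts in descending end order so the pop order reproduces A's shortest-prefix-first traversal and first-maximum tie-break.
import Mathlib
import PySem

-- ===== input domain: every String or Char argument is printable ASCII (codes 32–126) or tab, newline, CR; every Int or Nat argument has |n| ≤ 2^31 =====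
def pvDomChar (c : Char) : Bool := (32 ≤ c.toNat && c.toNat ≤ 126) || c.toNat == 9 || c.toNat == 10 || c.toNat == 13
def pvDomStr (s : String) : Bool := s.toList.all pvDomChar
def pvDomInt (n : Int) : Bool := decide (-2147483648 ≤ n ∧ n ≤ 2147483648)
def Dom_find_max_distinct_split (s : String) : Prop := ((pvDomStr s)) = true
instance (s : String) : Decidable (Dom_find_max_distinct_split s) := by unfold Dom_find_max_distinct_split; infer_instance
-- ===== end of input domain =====

-- B replaces A's recursive backtracking by an explicit-stack DFS with one global running best
-- (children pushed with end descending so pops visit shorter prefixes first, matching A's order);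
-- objective: alternative decomposition, same asymptotic cost.

-- ===== PORT A =====
-- A's inner `backtrack(start, path, used)`; the for-loop over end ∈ range(start+1, len(s)+1)
-- is the foldl over List.range' (start+1) (len-start) (= that range, as Nats; exact since the
-- bounds are nonnegative), accumulator = best_path.  s[start:end] with 0 ≤ start < end ≤ len is
-- exactly (drop start).take (end-start); num[0] == '0' on the nonempty num is cs.head? = some '0'.
def pvA_go (l : List Char) (start : Nat) (path : List String) (used : PySem.Set String) : List String :=
  if start = l.length then path
  else
    ((List.range' (start + 1) (l.length - start)).attach).foldl
      (fun best e =>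
        let cs := (l.drop start).take (e.1 - start)
        let num := String.ofList cs
        if cs.head? = some '0' ∧ 1 < cs.length then best
        else if PySem.Set.contains used num then best
        else
          let result := pvA_go l e.1 (path ++ [num]) (PySem.Set.add used num)
          if best.length < result.length then result else best)
      []
termination_by l.length - start
decreasing_by
  have := List.mem_range'_1.mp e.2
  omega

def find_max_distinct_split (s : String) : List String :=
  pvA_go s.toList 0 [] PySem.Set.empty

-- ===== PORT B =====
-- the DFS stack; head of the list = top of the Python stack (append = cons, pop = head)
def pvB_measure (n : Nat) (stack : List (Nat × List String × PySem.Set String)) : Nat :=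
  (stack.map (fun t => 2 ^ (n - t.1))).sum

-- termination helper for pvB_run: pushing the children of a node costs at most Σ 2^(n-e)
theorem pvB_push_le (n : Nat) (push : List (Nat × List String × PySem.Set String) → Nat → List (Nat × List String × PySem.Set String))
    (hpush : ∀ stk e, pvB_measure n (push stk e) ≤ pvB_measure n stk + 2 ^ (n - e)) :
    ∀ (L : List Nat) (stk : List (Nat × List String × PySem.Set String)),
    pvB_measure n (L.foldl push stk) ≤ pvB_measure n stk + (L.map (fun e => 2 ^ (n - e))).sum := by
  intro L
  induction L with
  | nil => intro stk; simp
  | cons e L ih =>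
    intro stk
    simp only [List.foldl_cons, List.map_cons, List.sum_cons]
    have h1 := ih (push stk e)
    have h2 := hpush stk e
    omega

-- termination helper for pvB_run: Σ_{e=start+1}^{start+m} 2^(n-e) ≤ 2^(n-start) - 1
theorem pvB_range_sum (n : Nat) :
    ∀ (m start : Nat), start + m ≤ n →
    ((List.range' (start + 1) m).map (fun e => 2 ^ (n - e))).sum ≤ 2 ^ (n - start) - 1 := by
  intro m
  induction m with
  | zero => intro start h; simp
  | succ m ih =>
    intro start h
    rw [List.range'_succ]
    have h2 := ih (start + 1) (by omega)
    simp only [List.map_cons, List.sum_cons]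
    have hpow : 2 ^ (n - start) = 2 ^ (n - (start + 1)) + 2 ^ (n - (start + 1)) := by
      have hn : n - start = (n - (start + 1)) + 1 := by omega
      rw [hn, pow_succ]; omega
    have h1 : (1 : Nat) ≤ 2 ^ (n - (start + 1)) := Nat.one_le_two_pow
    omega

-- B's while-loop; `for end in range(n, start, -1)` is the foldl over
-- (List.range' (start+1) (n-start)).reverse (= that countdown range, as Nats),
-- each non-skipped cut consed onto the stack (= stack.append), `continue` keeps the stack.
def pvB_run (l : List Char) (stack : List (Nat × List String × PySem.Set String))
    (best : List String) : List String :=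
  match stack with
  | [] => best
  | (start, path, used) :: rest =>
    if start = l.length then
      pvB_run l rest (if best.length < path.length then path else best)
    else
      pvB_run l
        (((List.range' (start + 1) (l.length - start)).reverse).foldl
          (fun stk e =>
            let cs := (l.drop start).take (e - start)
            let num := String.ofList cs
            if cs.head? = some '0' ∧ 1 < cs.length then stk
            else if PySem.Set.contains used num then stk
            else (e, path ++ [num], PySem.Set.add used num) :: stk)
          rest)
        best
termination_by pvB_measure l.length stack
decreasing_by
  · simp only [pvB_measure, List.map_cons, List.sum_cons]
    have : (1 : Nat) ≤ 2 ^ (l.length - start) := Nat.one_le_two_pow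
    omega
  · have hpush : ∀ stk e,
        pvB_measure l.length
          ((fun stk (e : Nat) =>
            let cs := (l.drop start).take (e - start)
            let num := String.ofList cs
            if cs.head? = some '0' ∧ 1 < cs.length then stk
            else if PySem.Set.contains used num then stk
            else (e, path ++ [num], PySem.Set.add used num) :: stk) stk e)
          ≤ pvB_measure l.length stk + 2 ^ (l.length - e) := by
      intro stk e
      simp only []
      split_ifs <;> simp [pvB_measure] <;> omega
    have h1 := pvB_push_le l.length _ hpush
      ((List.range' (start + 1) (l.length - start)).reverse) rest
    have h2 : (((List.range' (start + 1) (l.length - start)).reverse).map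
        (fun e => 2 ^ (l.length - e))).sum
        = ((List.range' (start + 1) (l.length - start)).map (fun e => 2 ^ (l.length - e))).sum := by
      rw [List.map_reverse, List.sum_reverse]
    have h4 : (1 : Nat) ≤ 2 ^ (l.length - start) := Nat.one_le_two_pow
    by_cases hs : start ≤ l.length
    · have h3 := pvB_range_sum l.length (l.length - start) start (by omega)
      simp only [pvB_measure, List.map_cons, List.sum_cons, dite_eq_ite] at *
      omega
    · have h0 : l.length - start = 0 := by omega
      simp only [h0, List.range'_zero, List.reverse_nil, List.foldl_nil,
        pvB_measure, List.map_cons, List.sum_cons] at *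
      omega

def find_max_distinct_split_alt (s : String) : List String :=
  pvB_run s.toList [(0, [], PySem.Set.empty)] []

-- ===== PRECONDITION & SPEC =====
def Spec_find_max_distinct_split (s : String) (out : List String) : Prop := out = find_max_distinct_split_alt s
instance (s : String) (out : List String) : Decidable (Spec_find_max_distinct_split s out) := by unfold Spec_find_max_distinct_split; infer_instance

-- ===== CLAIM (what is proved, stated in full; the proofs are below) =====
def Claim_equal_find_max_distinct_split : Prop := ∀ (s : String), Dom_find_max_distinct_split s → Spec_find_max_distinct_split s (find_max_distinct_split s)

-- ===== LEMMAS AND PROOFS =====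

-- the candidate child state at cut `e` (none = a skipped cut), shared vocabulary of the proofs
def pvChild (l : List Char) (start : Nat) (path : List String) (used : PySem.Set String) (e : Nat) :
    Option (Nat × List String × PySem.Set String) :=
  let cs := (l.drop start).take (e - start)
  let num := String.ofList cs
  if cs.head? = some '0' ∧ 1 < cs.length then none
  else if PySem.Set.contains used num then none
  else some (e, path ++ [num], PySem.Set.add used num)

theorem pvChild_fst (l : List Char) (start : Nat) (path : List String) (used : PySem.Set String)
    (e : Nat) (c : Nat × List String × PySem.Set String)
    (h : pvChild l start path used e = some c) : c.1 = e := by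
  simp only [pvChild] at h
  split_ifs at h
  all_goals first
    | exact Option.noConfusion h
    | exact (congrArg Prod.fst (Option.some_inj.mp h)).symm

-- "first maximum wins" accumulator step shared by A's per-node update and B's leaf update
def pvStep (b r : List String) : List String := if b.length < r.length then r else b

-- all complete splits reachable from a state, in A's (and B's) DFS order
def pvLv (l : List Char) (start : Nat) (path : List String) (used : PySem.Set String) :
    List (List String) :=
  if start = l.length then [path]
  else
    ((List.range' (start + 1) (l.length - start)).attach).foldl
      (fun acc e =>
        match hc : pvChild l start path used e.1 with
        | none => acc
        | some c => acc ++ pvLv l c.1 c.2.1 c.2.2)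
      []
termination_by l.length - start
decreasing_by
  have h1 := List.mem_range'_1.mp e.2
  have h2 := pvChild_fst l start path used e.1 c hc
  omega

theorem pvAbsorb : ∀ (M : List (List String)) (b : List String),
    M.foldl pvStep b = pvStep b (M.foldl pvStep []) := by
  intro M
  induction M with
  | nil => intro b; simp [pvStep]
  | cons r M ih =>
    intro b
    simp only [List.foldl_cons]
    rw [ih (pvStep b r), ih (pvStep [] r)]
    unfold pvStep
    split_ifs <;> simp_all <;> omega

theorem pvFoldl_step_flatMap (C : Nat → List (List String)) :
    ∀ (L : List Nat) (b : List String),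
    L.foldl (fun b e => (C e).foldl pvStep b) b = (L.flatMap C).foldl pvStep b := by
  intro L
  induction L with
  | nil => intro b; simp
  | cons e L ih =>
    intro b
    simp only [List.foldl_cons, List.flatMap_cons, List.foldl_append]
    exact ih _

-- the leaves of an inner node, as a flatMap over its children
theorem pvLv_node (l : List Char) (start : Nat) (path : List String) (used : PySem.Set String)
    (h : ¬ start = l.length) :
    pvLv l start path used
      = (List.range' (start + 1) (l.length - start)).flatMap
          (fun e => match pvChild l start path used e with
            | none => []
            | some c => pvLv l c.1 c.2.1 c.2.2) := by
  rw [pvLv, if_neg h]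
  refine Eq.trans (PySem.List.foldl_congr_mem _ _
      (fun (acc : List (List String)) (e : {x // x ∈ List.range' (start + 1) (l.length - start)}) =>
        acc ++ (match pvChild l start path used e.1 with
          | none => []
          | some c => pvLv l c.1 c.2.1 c.2.2)) _ ?_) ?_
  · intro acc e _
    cases hc : pvChild l start path used e.1 <;> simp [hc]
  · have hat := @List.foldl_attach _ _ (List.range' (start + 1) (l.length - start))
      (fun (acc : List (List String)) x =>
        acc ++ (match pvChild l start path used x with
          | none => []
          | some c => pvLv l c.1 c.2.1 c.2.2)) []
    rw [hat, PySem.List.foldl_append_eq_flatMap]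
    simp

-- A computes the first maximum-length leaf
theorem pvA_eq (l : List Char) : ∀ (k start : Nat), l.length - start ≤ k →
    ∀ (path : List String) (used : PySem.Set String),
    pvA_go l start path used = (pvLv l start path used).foldl pvStep [] := by
  intro k
  induction k with
  | zero =>
    intro start hk path used
    by_cases hs : start = l.length
    · rw [pvA_go, pvLv, if_pos hs, if_pos hs]
      cases path <;> simp [pvStep]
    · have h0 : l.length - start = 0 := by omega
      rw [pvA_go, pvLv, if_neg hs, if_neg hs, h0]
      simp
  | succ k ih =>
    intro start hk path used
    by_cases hs : start = l.length
    · rw [pvA_go, pvLv, if_pos hs, if_pos hs]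
      cases path <;> simp [pvStep]
    · rw [pvA_go, if_neg hs, pvLv_node l start path used hs]
      refine Eq.trans (PySem.List.foldl_congr_mem _ _
          (fun (best : List String) (e : {x // x ∈ List.range' (start + 1) (l.length - start)}) =>
            (match pvChild l start path used e.1 with
              | none => ([] : List (List String))
              | some c => pvLv l c.1 c.2.1 c.2.2).foldl pvStep best) _ ?_) ?_
      · intro best e _
        have hb := List.mem_range'_1.mp e.2
        have he : l.length - e.1 ≤ k := by omega
        simp only [pvChild]
        split_ifs with h1 h2 h3
        · simp
        · simp
        · simp only []
          rw [pvAbsorb, ← ih e.1 he]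
          simp [pvStep, h3]
        · simp only []
          rw [pvAbsorb, ← ih e.1 he]
          simp [pvStep, h3]
      · have hat := @List.foldl_attach _ _ (List.range' (start + 1) (l.length - start))
          (fun (best : List String) x =>
            (match pvChild l start path used x with
              | none => ([] : List (List String))
              | some c => pvLv l c.1 c.2.1 c.2.2).foldl pvStep best) []
        rw [hat, pvFoldl_step_flatMap]

-- pushing the children of a node, as a filterMap prepended to the stack
theorem pvPush_eq (f : Nat → Option (Nat × List String × PySem.Set String)) :
    ∀ (L : List Nat) (stk : List (Nat × List String × PySem.Set String)),
    L.foldl (fun stk e => match f e with | none => stk | some c => c :: stk) stk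
      = (L.reverse.filterMap f) ++ stk := by
  intro L
  induction L with
  | nil => intro stk; simp
  | cons e L ih =>
    intro stk
    simp only [List.foldl_cons, List.reverse_cons, List.filterMap_append, List.append_assoc]
    rw [ih]
    cases hfe : f e <;> simp [hfe]

theorem pvFlatMap_filterMap (f : Nat → Option (Nat × List String × PySem.Set String))
    (g : Nat × List String × PySem.Set String → List (List String)) :
    ∀ (L : List Nat),
    (L.filterMap f).flatMap g
      = L.flatMap (fun e => match f e with | none => [] | some c => g c) := by
  intro L
  induction L with
  | nil => simp
  | cons e L ih =>
    simp only [List.filterMap_cons, List.flatMap_cons]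
    cases hfe : f e <;> simp [ih]

-- B's machine folds pvStep over the leaves of the whole stack
theorem pvB_eq (l : List Char) : ∀ (stack : List (Nat × List String × PySem.Set String))
    (best : List String),
    pvB_run l stack best
      = (stack.flatMap (fun t => pvLv l t.1 t.2.1 t.2.2)).foldl pvStep best := by
  intro stack best
  induction stack, best using pvB_run.induct l with
  | case1 best => simp [pvB_run]
  | case2 best path used rest ih =>
    rw [pvB_run, if_pos rfl]
    simp only [dite_eq_ite] at ih
    rw [ih]
    simp only [List.flatMap_cons]
    rw [pvLv, if_pos rfl]
    simp only [List.singleton_append, List.foldl_cons]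
    rfl
  | case3 best start path used rest hne ih =>
    rw [pvB_run, if_neg hne]
    simp only [dite_eq_ite] at ih
    rw [ih]
    refine Eq.trans (congrArg
        (fun st : List (Nat × List String × PySem.Set String) =>
          (st.flatMap (fun t => pvLv l t.1 t.2.1 t.2.2)).foldl pvStep best)
        (?_ : _ = (List.range' (start + 1) (l.length - start)).filterMap
            (pvChild l start path used) ++ rest)) ?_
    · refine Eq.trans (PySem.List.foldl_congr_mem _ _
          (fun stk e => match pvChild l start path used e with
            | none => stk | some c => c :: stk) _ ?_) ?_
      · intro stk e _
        simp only [pvChild]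
        split_ifs <;> rfl
      · rw [pvPush_eq, List.reverse_reverse]
    · rw [List.flatMap_append, pvFlatMap_filterMap, List.flatMap_cons,
        pvLv_node l start path used hne, List.foldl_append]

-- ===== VERDICT (by name: the statement is the Claim_ definition above) =====
theorem find_max_distinct_split_spec : Claim_equal_find_max_distinct_split := by
  intro s _
  unfold Spec_find_max_distinct_split find_max_distinct_split find_max_distinct_split_alt
  rw [pvA_eq s.toList (s.toList.length - 0) 0 (le_refl _), pvB_eq]
  simp
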